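-- pv_equiv track=rewrite | github.com/UFFETKK/algorithm | level.1/약수의개수와덧셈.py | solution
-- ===== SOURCE A (Python) =====
-- def solution(left, right):
--     answer = 0
--     for a in range(left,right+1) :
--         d = 0
--         for i in range(1,a+1) :
--             if a%i == 0 : d=d+1
--         if d%2 ==0 : answer +=a
--         else : answer -= a
--     return answer
-- ===== SOURCE B (Python) =====
-- def solution(left, right):
--     if left > right:
--         return 0
--     total = (left + right) * (right - left + 1) // 2
--     corr = 0
--     k = 1
--     while k * k <= right:
--         if k * k >= left:
--             corr += 2 * k * k
--         k += 1
--     return total - corr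
-- ===== Notes on version B (the rewrite author's own statement) =====
-- stated objective: faster
-- what changed: Replaces the per-number divisor-counting double loop with the closed-form Gauss sum of the range minus 2*k*k for each integer square root k whose square lies in the range (divisor count is odd exactly for perfect squares).
import Mathlib
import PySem

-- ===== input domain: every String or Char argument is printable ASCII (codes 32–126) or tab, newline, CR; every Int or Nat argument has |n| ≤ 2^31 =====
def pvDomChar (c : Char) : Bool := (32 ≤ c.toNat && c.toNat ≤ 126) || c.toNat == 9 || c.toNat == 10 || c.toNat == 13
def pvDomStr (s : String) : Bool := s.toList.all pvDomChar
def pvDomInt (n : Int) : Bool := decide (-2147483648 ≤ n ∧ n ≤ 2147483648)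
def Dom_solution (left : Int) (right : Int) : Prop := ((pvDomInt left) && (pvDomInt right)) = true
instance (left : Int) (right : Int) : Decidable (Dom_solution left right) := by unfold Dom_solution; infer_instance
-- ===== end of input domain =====

-- B replaces A's per-number divisor-counting double loop by the closed-form Gauss sum of the
-- range minus 2*k*k for each integer root k whose square lies in the range (faster).


-- ===== PORT A =====
def solution (left : Int) (right : Int) : Int :=
  (PySem.List.pyRange left (right+1) 1).foldl
    (fun answer a =>
      let d : Int := (PySem.List.pyRange 1 (a+1) 1).foldl
        (fun d i => if PySem.Int.mod a i == 0 then d + 1 else d) 0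
      if PySem.Int.mod d 2 == 0 then answer + a else answer - a) 0

-- ===== PORT B =====
-- the while loop of Source B: k counts up while k*k <= right, adding 2*k*k when k*k >= left
def solAltLoop (left : Int) (right : Int) (k : Int) (corr : Int) : Int :=
  if _h : k * k ≤ right then
    solAltLoop left right (k + 1) (if k * k ≥ left then corr + 2 * k * k else corr)
  else corr
termination_by (right + 1 - k).toNat
decreasing_by
  have hk : k ≤ right := by nlinarith [mul_self_nonneg k, mul_self_nonneg (k - 1)]
  omega

def solution_alt (left : Int) (right : Int) : Int :=
  if left > right then 0
  else PySem.Int.floordiv ((left + right) * (right - left + 1)) 2 - solAltLoop left right 1 0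

-- ===== PRECONDITION & SPEC =====
def Spec_solution (left : Int) (right : Int) (out : Int) : Prop := out = solution_alt left right
instance (left : Int) (right : Int) (out : Int) : Decidable (Spec_solution left right out) := by unfold Spec_solution; infer_instance

-- ===== CLAIM (what is proved, stated in full; the proofs are below) =====
def Claim_equal_solution : Prop := ∀ (left : Int) (right : Int), Dom_solution left right → Spec_solution left right (solution left right)

-- ===== LEMMAS AND PROOFS =====

-- 2*a for a positive perfect square a, else 0 (the per-element correction to the plain sum)
def sqCorr (a : Int) : Int := if 0 < a ∧ IsSquare a.toNat then 2 * a else 0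

-- Nat.sqrt of the nonnegative part, as an Int
def isq (r : Int) : Int := (Nat.sqrt r.toNat : Int)

-- the value Source B's loop adds for root j
def rootTerm (left : Int) (j : Int) : Int := if j * j ≥ left then 2 * (j * j) else 0

-- a number ≥ 1 has an odd number of divisors iff it is a perfect square
lemma odd_card_divisors_iff (n : ℕ) (hn : n ≠ 0) : Odd n.divisors.card ↔ IsSquare n := by
  classical
  set fix := n.divisors.filter (fun d => d * d = n) with hfixdef
  set rest := n.divisors.filter (fun d => ¬ d * d = n) with hrestdef
  have hsplit : fix.card + rest.card = n.divisors.card :=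
    Finset.card_filter_add_card_filter_not (s := n.divisors) (p := fun d => d * d = n)
  have hrest : Even rest.card := by
    have hsum : ∑ _x ∈ rest, (1 : ZMod 2) = 0 := by
      apply Finset.sum_involution (g := fun a _ => n / a)
      · intro a ha; decide
      · intro a ha h1
        simp only [hrestdef, Finset.mem_filter, Nat.mem_divisors] at ha
        intro heq
        exact ha.2 (by conv_rhs => rw [← Nat.div_mul_cancel ha.1.1, heq])
      · intro a ha
        simp only [hrestdef, Finset.mem_filter, Nat.mem_divisors] at ha ⊢
        obtain ⟨⟨hdvd, _⟩, hne⟩ := ha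
        refine ⟨⟨Nat.div_dvd_of_dvd hdvd, hn⟩, ?_⟩
        intro heq
        apply hne
        have ha0 : 0 < a := Nat.pos_of_dvd_of_pos hdvd (Nat.pos_of_ne_zero hn)
        have hd0 : 0 < n / a := Nat.div_pos (Nat.le_of_dvd (Nat.pos_of_ne_zero hn) hdvd) ha0
        have h2 : n / a * a = n := Nat.div_mul_cancel hdvd
        have h3 : n / a * (n / a) = n / a * a := by rw [heq, h2]
        have h4 : n / a = a := Nat.eq_of_mul_eq_mul_left hd0 h3
        rw [← h4]; exact heq
      · intro a ha
        simp only [hrestdef, Finset.mem_filter, Nat.mem_divisors] at ha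
        exact Nat.div_div_self ha.1.1 hn
    rw [Finset.sum_const, nsmul_eq_mul, mul_one] at hsum
    exact ZMod.natCast_eq_zero_iff_even.mp hsum
  constructor
  · intro hodd
    by_contra hns
    have hfix : fix = ∅ := by
      ext d
      simp only [hfixdef, Finset.mem_filter, Nat.mem_divisors, Finset.notMem_empty, iff_false]
      rintro ⟨_, hdd⟩
      exact hns ⟨d, (by rw [← hdd])⟩
    rw [hfix] at hsplit
    simp at hsplit
    rw [← hsplit] at hodd
    rcases hrest with ⟨m, hm⟩
    rcases hodd with ⟨j, hj⟩
    omega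
  · rintro ⟨r, hr⟩
    have hr0 : 0 < r := by
      rcases Nat.eq_zero_or_pos r with h | h
      · subst h; simp at hr; omega
      · exact h
    have hfix : fix = {r} := by
      ext d
      simp only [hfixdef, Finset.mem_filter, Nat.mem_divisors, Finset.mem_singleton]
      constructor
      · rintro ⟨_, hdd⟩
        have : d * d = r * r := by rw [hdd, hr]
        exact Nat.mul_self_inj.mp this
      · intro h
        subst h
        exact ⟨⟨⟨d, hr⟩, hn⟩, hr.symm⟩
    rw [hfix] at hsplit
    simp at hsplit
    rw [← hsplit]
    rcases hrest with ⟨m, hm⟩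
    exact ⟨m, by omega⟩

lemma countP_range (p : ℕ → Bool) (n : ℕ) :
    (List.range n).countP p = ((Finset.range n).filter (fun k => p k)).card := by
  induction n with
  | zero => simp
  | succ m ih =>
    rw [List.range_succ, List.countP_append, Finset.range_add_one, Finset.filter_insert]
    by_cases h : p m
    · rw [if_pos h, Finset.card_insert_of_notMem (by simp)]
      simp [h, ih]
    · rw [if_neg h]
      simp [h, ih]

lemma card_shift (n : ℕ) (hn : n ≠ 0) :
    ((Finset.range n).filter (fun k => (1+k) ∣ n)).card = n.divisors.card := by
  apply Finset.card_bij (fun k _ => 1 + k)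
  · intro k hk
    simp only [Finset.mem_filter, Finset.mem_range] at hk
    simp only [Nat.mem_divisors]
    exact ⟨hk.2, hn⟩
  · intro a ha b hb h; omega
  · intro d hd
    simp only [Nat.mem_divisors] at hd
    have h1 : 1 ≤ d := Nat.pos_of_dvd_of_pos hd.1 (Nat.pos_of_ne_zero hn)
    refine ⟨d - 1, ?_, by omega⟩
    simp only [Finset.mem_filter, Finset.mem_range]
    have h2 : d ≤ n := Nat.le_of_dvd (Nat.pos_of_ne_zero hn) hd.1
    have h3 : 1 + (d - 1) = d := by omega
    rw [h3]
    exact ⟨by omega, hd.1⟩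

-- A's inner loop counts the divisors of a (for a ≥ 1)
lemma inner_count (a : Int) (ha : 1 ≤ a) :
    (PySem.List.pyRange 1 (a+1) 1).countP (fun i => PySem.Int.mod a i == 0)
      = a.toNat.divisors.card := by
  set n := a.toNat with hn
  have han : a = (n : Int) := by omega
  rw [PySem.List.pyRange_one, List.countP_map]
  have hcut : (a + 1 - 1).toNat = n := by omega
  rw [hcut]
  have hpred : ∀ k : ℕ, (((fun i => PySem.Int.mod a i == 0) ∘ (fun k : ℕ => (1 : Int) + k)) k = true)
      ↔ (decide ((1+k) ∣ n) = true) := by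
    intro k
    simp only [Function.comp, beq_iff_eq, decide_eq_true_eq]
    rw [PySem.Int.mod_eq_zero_iff_dvd, han]
    constructor
    · intro h; exact_mod_cast h
    · intro h; exact_mod_cast h
  rw [List.countP_congr (fun k _ => hpred k), countP_range]
  rw [show ((Finset.range n).filter (fun k => decide ((1+k) ∣ n) = true))
      = ((Finset.range n).filter (fun k => (1+k) ∣ n)) from Finset.filter_congr (by simp)]
  exact card_shift n (by omega)

-- A's loop body adds a, minus the square correction
lemma body_eq (answer a : Int) :
    (let d : Int := (PySem.List.pyRange 1 (a+1) 1).foldl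
        (fun d i => if PySem.Int.mod a i == 0 then d + 1 else d) 0
      if PySem.Int.mod d 2 == 0 then answer + a else answer - a)
    = answer + (a - sqCorr a) := by
  rw [PySem.List.foldl_if_add_one]
  by_cases ha : 1 ≤ a
  · rw [inner_count a ha]
    have hn : a.toNat ≠ 0 := by omega
    by_cases hsq : IsSquare a.toNat
    · have hodd : Odd a.toNat.divisors.card := (odd_card_divisors_iff _ hn).mpr hsq
      have hmod : ¬ (PySem.Int.mod (0 + (a.toNat.divisors.card : Int)) 2 = 0) := by
        rw [PySem.Int.mod_eq_zero_iff_dvd]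
        rcases hodd with ⟨m, hm⟩
        intro ⟨c, hc⟩
        omega
      simp only [beq_iff_eq, if_neg hmod]
      rw [sqCorr, if_pos ⟨by omega, hsq⟩]
      ring
    · have heven : ¬ Odd a.toNat.divisors.card := by
        rw [odd_card_divisors_iff _ hn]; exact hsq
      rw [Nat.not_odd_iff_even] at heven
      have hmod : PySem.Int.mod (0 + (a.toNat.divisors.card : Int)) 2 = 0 := by
        rw [PySem.Int.mod_eq_zero_iff_dvd]
        rcases heven with ⟨m, hm⟩
        exact ⟨m, by omega⟩
      simp only [beq_iff_eq, if_pos hmod]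
      rw [sqCorr, if_neg (by rintro ⟨_, h⟩; exact hsq h)]
      ring
  · rw [PySem.List.pyRange_one_eq_nil (by omega)]
    simp only [List.countP_nil]
    norm_num [PySem.Int.mod_eq_zero_iff_dvd]
    rw [sqCorr, if_neg (by rintro ⟨h, _⟩; omega)]
    ring

-- Gauss: twice the sum of the inclusive range
lemma gauss : ∀ (N : ℕ) (l r : Int), l ≤ r → (r - l).toNat ≤ N →
    2 * (PySem.List.pyRange l (r+1) 1).sum = (l + r) * (r - l + 1) := by
  intro N
  induction N with
  | zero =>
    intro l r h1 h2
    have : l = r := by omega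
    subst this
    rw [PySem.List.pyRange_one_singleton]
    simp; ring
  | succ N ih =>
    intro l r h1 h2
    by_cases heq : l = r
    · subst heq
      rw [PySem.List.pyRange_one_singleton]
      simp; ring
    · have hlt : l ≤ r - 1 := by omega
      rw [PySem.List.pyRange_one_succ_right h1, List.sum_append]
      have hprev := ih l (r-1) hlt (by omega)
      rw [show (r - 1 + 1 : Int) = r by ring] at hprev
      simp only [List.sum_cons, List.sum_nil]
      linear_combination hprev

-- for k ≥ 1: k² ≤ right iff k is at most the integer square root of right
lemma sq_le_iff (k right : Int) (hk : 1 ≤ k) : k * k ≤ right ↔ k ≤ isq right := by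
  unfold isq
  constructor
  · intro h
    have hr : 0 ≤ right := by nlinarith
    have hkk : k.toNat * k.toNat ≤ right.toNat := by
      have : (k.toNat : Int) * (k.toNat : Int) ≤ (right.toNat : Int) := by
        rw [Int.toNat_of_nonneg (by omega), Int.toNat_of_nonneg hr]; exact h
      exact_mod_cast this
    have := Nat.le_sqrt.mpr hkk
    omega
  · intro h
    have hs : 1 ≤ Nat.sqrt right.toNat := by omega
    have hr : right.toNat ≠ 0 := by
      intro h0; rw [h0] at hs; simp [Nat.sqrt_zero] at hs
    have hkk : k.toNat * k.toNat ≤ right.toNat := Nat.le_sqrt.mp (by omega)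
    have hcast : (k.toNat : Int) * (k.toNat : Int) ≤ (right.toNat : Int) := by exact_mod_cast hkk
    rw [Int.toNat_of_nonneg (by omega)] at hcast
    omega

-- the characterisation of Source B's while loop
lemma altLoop_eq (left right : Int) : ∀ (N : ℕ) (k corr : Int), 1 ≤ k →
    (isq right + 1 - k).toNat ≤ N →
    solAltLoop left right k corr
      = corr + ((PySem.List.pyRange k (isq right + 1) 1).map (rootTerm left)).sum := by
  intro N
  induction N with
  | zero =>
    intro k corr hk hN
    rw [solAltLoop]
    have hnot : ¬ (k * k ≤ right) := by
      rw [sq_le_iff k right hk]; omega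
    rw [dif_neg hnot, PySem.List.pyRange_one_eq_nil (by omega)]
    simp
  | succ N ih =>
    intro k corr hk hN
    rw [solAltLoop]
    by_cases h : k * k ≤ right
    · have hle : k ≤ isq right := (sq_le_iff k right hk).mp h
      have hfuel : (isq right + 1 - (k+1)).toNat ≤ N := by omega
      rw [dif_pos h,
        PySem.List.pyRange_one_cons (show k < isq right + 1 by omega),
        List.map_cons, List.sum_cons, ih (k+1) _ (by omega) hfuel]
      unfold rootTerm
      by_cases hL : k * k ≥ left
      · rw [if_pos hL, if_pos hL]; ring
      · rw [if_neg hL, if_neg hL]; ring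
    · rw [dif_neg h]
      have : isq right < k := by
        by_contra hc
        exact h ((sq_le_iff k right hk).mpr (by omega))
      rw [PySem.List.pyRange_one_eq_nil (by omega)]
      simp

lemma sqrt_pred_of_square (r : ℕ) (hr : 1 ≤ r) : Nat.sqrt (r * r - 1) = r - 1 := by
  obtain ⟨t, rfl⟩ : ∃ t, r = t + 1 := ⟨r - 1, by omega⟩
  have hx : (t+1)*(t+1) = t*t + 2*t + 1 := by ring
  have hy : (t+1)*(t+1) - 1 = t*t + 2*t := by omega
  rw [hy, Nat.sqrt_add_eq t (by omega)]
  omega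

lemma sqrt_pred_of_not_square (n : ℕ) (hn : 1 ≤ n) (h : ¬ IsSquare n) :
    Nat.sqrt (n - 1) = Nat.sqrt n := by
  have hle : Nat.sqrt (n - 1) ≤ Nat.sqrt n := Nat.sqrt_le_sqrt (by omega)
  have hne : Nat.sqrt n * Nat.sqrt n ≠ n := by
    intro he; exact h ⟨Nat.sqrt n, he.symm⟩
  have hlt : Nat.sqrt n * Nat.sqrt n ≤ n - 1 := by
    have := Nat.sqrt_le n; omega
  have := Nat.le_sqrt.mpr hlt
  omega

-- reindexing: square corrections over the range = root terms over 1..isq right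
lemma reindex : ∀ (N : ℕ) (left right : Int), (right - left + 1).toNat ≤ N →
    ((PySem.List.pyRange left (right+1) 1).map sqCorr).sum
      = ((PySem.List.pyRange 1 (isq right + 1) 1).map (rootTerm left)).sum := by
  intro N
  induction N with
  | zero =>
    intro left right hN
    rw [PySem.List.pyRange_one_eq_nil (by omega), List.map_nil, List.sum_nil]
    symm
    apply List.sum_eq_zero
    intro x hx
    rcases List.mem_map.mp hx with ⟨j, hj, rfl⟩
    rw [PySem.List.mem_pyRange_one] at hj
    have hjj : j * j ≤ right := (sq_le_iff j right (by omega)).mpr (by omega)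
    unfold rootTerm
    rw [if_neg (by omega)]
  | succ N ih =>
    intro left right hN
    by_cases hlr : right < left
    · rw [PySem.List.pyRange_one_eq_nil (by omega), List.map_nil, List.sum_nil]
      symm
      apply List.sum_eq_zero
      intro x hx
      rcases List.mem_map.mp hx with ⟨j, hj, rfl⟩
      rw [PySem.List.mem_pyRange_one] at hj
      have hjj : j * j ≤ right := (sq_le_iff j right (by omega)).mpr (by omega)
      unfold rootTerm
      rw [if_neg (by omega)]
    · have hlr' : left ≤ right := by omega
      rw [PySem.List.pyRange_one_succ_right hlr', List.map_append, List.sum_append]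
      have hprev := ih left (right - 1) (by omega)
      rw [show (right - 1 + 1 : Int) = right by ring] at hprev
      rw [hprev]
      simp only [List.map_cons, List.map_nil, List.sum_cons, List.sum_nil, add_zero]
      by_cases hsq : 0 < right ∧ IsSquare right.toNat
      · obtain ⟨hpos, r, hr⟩ := hsq
        have hr1 : 1 ≤ r := by
          rcases Nat.eq_zero_or_pos r with h0 | h
          · rw [h0] at hr; omega
          · exact h
        have hs : isq right = (r : Int) := by
          unfold isq; rw [hr, Nat.sqrt_eq]
        have hspred : isq (right - 1) = (r : Int) - 1 := by
          unfold isq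
          have : (right - 1).toNat = r * r - 1 := by omega
          rw [this, sqrt_pred_of_square r hr1]
          omega
        rw [hspred, hs]
        rw [show ((r : Int) - 1 + 1) = (r : Int) by ring,
          PySem.List.pyRange_one_succ_right (by exact_mod_cast hr1),
          List.map_append, List.sum_append]
        simp only [List.map_cons, List.map_nil, List.sum_cons, List.sum_nil, add_zero]
        unfold sqCorr rootTerm
        have hrr : (r : Int) * (r : Int) = right := by
          have : (r * r : ℕ) = right.toNat := hr.symm
          omega
        rw [if_pos ⟨hpos, ⟨r, hr⟩⟩, if_pos (by omega)]
        omega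
      · have hz : sqCorr right = 0 := by
          unfold sqCorr; rw [if_neg hsq]
        have hsame : isq (right - 1) = isq right := by
          unfold isq
          by_cases hpos : 0 < right
          · have hnsq : ¬ IsSquare right.toNat := by
              intro h; exact hsq ⟨hpos, h⟩
            have : (right - 1).toNat = right.toNat - 1 := by omega
            rw [this, sqrt_pred_of_not_square right.toNat (by omega) hnsq]
          · have h1 : (right - 1).toNat = 0 := by omega
            have h2 : right.toNat = 0 := by omega
            rw [h1, h2]
        rw [hsame, hz, add_zero]

lemma sum_map_sub (g : Int → Int) (l : List Int) :
    (l.map (fun a => a - g a)).sum = l.sum - (l.map g).sum := by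
  induction l with
  | nil => simp
  | cons x xs ih => simp only [List.map_cons, List.sum_cons, ih]; ring

-- ===== VERDICT (by name: the statement is the Claim_ definition above) =====
theorem solution_spec : Claim_equal_solution := by
  intro left right _
  unfold Spec_solution solution solution_alt
  have hbody : (fun (answer a : Int) =>
      let d : Int := (PySem.List.pyRange 1 (a+1) 1).foldl
        (fun d i => if PySem.Int.mod a i == 0 then d + 1 else d) 0
      if PySem.Int.mod d 2 == 0 then answer + a else answer - a)
      = (fun answer a => answer + (a - sqCorr a)) := by
    funext answer a
    exact body_eq answer a
  rw [hbody, PySem.List.foldl_add (g := fun a => a - sqCorr a)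
    (l := PySem.List.pyRange left (right+1) 1) (a := 0), sum_map_sub]
  rw [zero_add]
  by_cases h : left > right
  · rw [if_pos h, PySem.List.pyRange_one_eq_nil (by omega)]
    simp
  · rw [if_neg h,
      altLoop_eq left right ((isq right + 1 - 1).toNat) 1 0 (le_refl 1) (by omega),
      ← reindex ((right - left + 1).toNat) left right (by omega)]
    have hg := gauss ((right - left).toNat) left right (by omega) (by omega)
    have hfd : PySem.Int.floordiv ((left + right) * (right - left + 1)) 2
        = (PySem.List.pyRange left (right+1) 1).sum := by
      rw [PySem.Int.floordiv_eq_ediv_of_pos (by norm_num)]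
      omega
    rw [hfd]
    ring
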